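-- pv_equiv track=rewrite | github.com/prasantk47/governexplus | core/approvals/kpis.py | _determine_breach_cause
-- ===== SOURCE A (Python) =====
-- from typing import Dict, List, Optional, Any, Tuple
--
-- def _determine_breach_cause(record: Dict[str, Any]) -> str:
--     """Determine likely cause of SLA breach."""
--     approvers = record.get("approvers", [])
--
--     # Check for OOO approvers
--     for approver in approvers:
--         if approver.get("was_ooo"):
--             return "Approver out of office"
--
--     # Check for high queue
--     for approver in approvers:
--         if approver.get("queue_size", 0) > 10:
--             return "Approver overloaded"
--
--     # Check for multiple approvers
--     if len(approvers) > 3: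
--         return "Multiple approval levels"
--
--     return "Unknown"
-- ===== SOURCE B (Python) =====
-- def _determine_breach_cause(record):
--     """Determine likely cause of SLA breach (single pass, priority decision after the loop)."""
--     approvers = record.get("approvers", [])
--     any_ooo = any_overloaded = False
--     for approver in approvers:
--         any_ooo = any_ooo or bool(approver.get("was_ooo"))
--         any_overloaded = any_overloaded or approver.get("queue_size", 0) > 10
--     if any_ooo:
--         return "Approver out of office"
--     if any_overloaded:
--         return "Approver overloaded"
--     if len(approvers) > 3:
--         return "Multiple approval levels"
--     return "Unknown"
-- ===== Notes on version B (the rewrite author's own statement) =====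
-- stated objective: alternative
-- what changed: Replaces A's two sequential early-return scans over the approvers with a single fold that accumulates two booleans (any OOO, any overloaded) and decides the cause in priority order after the loop.
import Mathlib
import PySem

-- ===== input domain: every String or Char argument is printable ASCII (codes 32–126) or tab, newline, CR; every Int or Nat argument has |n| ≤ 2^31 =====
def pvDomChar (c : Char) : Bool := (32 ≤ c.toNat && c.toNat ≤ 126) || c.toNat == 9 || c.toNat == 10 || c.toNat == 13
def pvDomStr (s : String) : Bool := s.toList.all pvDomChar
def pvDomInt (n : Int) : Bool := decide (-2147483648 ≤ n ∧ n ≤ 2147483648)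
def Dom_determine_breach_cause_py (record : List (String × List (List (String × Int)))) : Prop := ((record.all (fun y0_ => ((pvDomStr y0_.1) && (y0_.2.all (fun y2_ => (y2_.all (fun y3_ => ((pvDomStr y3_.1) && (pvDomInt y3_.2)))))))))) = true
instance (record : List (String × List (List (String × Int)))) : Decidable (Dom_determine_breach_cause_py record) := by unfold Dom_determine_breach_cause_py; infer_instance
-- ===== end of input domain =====

-- B replaces A's two sequential early-return scans with one fold accumulating two booleans,
-- deciding the cause in priority order after the loop (alternative decomposition, same cost).

-- ===== PORT A =====
-- approver.get("was_ooo") truthy: present with a nonzero Int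
def pvWasOoo (approver : List (String × Int)) : Bool :=
  match (PySem.Dict.mk approver).get? "was_ooo" with
  | some v => v != 0
  | none => false

-- approver.get("queue_size", 0) > 10
def pvOverloaded (approver : List (String × Int)) : Bool :=
  decide ((PySem.Dict.mk approver).getD "queue_size" 0 > 10)

-- first loop: early return on OOO
def pvLoopOoo : List (List (String × Int)) → Option String
  | [] => none
  | a :: rest => if pvWasOoo a then some "Approver out of office" else pvLoopOoo rest

-- second loop: early return on queue_size > 10
def pvLoopOver : List (List (String × Int)) → Option String
  | [] => none
  | a :: rest => if pvOverloaded a then some "Approver overloaded" else pvLoopOver rest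

def determine_breach_cause_py (record : List (String × List (List (String × Int)))) : String :=
  let approvers := ((PySem.Dict.mk record).get? "approvers").getD []
  match pvLoopOoo approvers with
  | some s => s
  | none =>
    match pvLoopOver approvers with
    | some s => s
    | none =>
      if PySem.List.len approvers > 3 then "Multiple approval levels" else "Unknown"

-- ===== PORT B =====
def determine_breach_cause_py_alt (record : List (String × List (List (String × Int)))) : String :=
  let approvers := ((PySem.Dict.mk record).get? "approvers").getD []
  let flags := approvers.foldl
    (fun (st : Bool × Bool) a => (st.1 || pvWasOoo a, st.2 || pvOverloaded a)) (false, false)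
  if flags.1 then "Approver out of office"
  else if flags.2 then "Approver overloaded"
  else if PySem.List.len approvers > 3 then "Multiple approval levels"
  else "Unknown"

-- ===== PRECONDITION & SPEC =====
def Spec_determine_breach_cause_py (record : List (String × List (List (String × Int)))) (out : String) : Prop := out = determine_breach_cause_py_alt record
instance (record : List (String × List (List (String × Int)))) (out : String) : Decidable (Spec_determine_breach_cause_py record out) := by unfold Spec_determine_breach_cause_py; infer_instance

-- ===== CLAIM (what is proved, stated in full; the proofs are below) =====
def Claim_equal_determine_breach_cause_py : Prop := ∀ (record : List (String × List (List (String × Int)))), Dom_determine_breach_cause_py record → Spec_determine_breach_cause_py record (determine_breach_cause_py record)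

-- ===== LEMMAS AND PROOFS =====

theorem pvLoopOoo_eq_any (xs : List (List (String × Int))) :
    pvLoopOoo xs = if xs.any pvWasOoo then some "Approver out of office" else none := by
  induction xs with
  | nil => rfl
  | cons a rest ih =>
    simp only [pvLoopOoo, List.any_cons, ih]
    by_cases h : pvWasOoo a <;> simp [h]

theorem pvLoopOver_eq_any (xs : List (List (String × Int))) :
    pvLoopOver xs = if xs.any pvOverloaded then some "Approver overloaded" else none := by
  induction xs with
  | nil => rfl
  | cons a rest ih =>
    simp only [pvLoopOver, List.any_cons, ih]
    by_cases h : pvOverloaded a <;> simp [h]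

theorem pvFold_eq_any (xs : List (List (String × Int))) (b1 b2 : Bool) :
    xs.foldl (fun (st : Bool × Bool) a => (st.1 || pvWasOoo a, st.2 || pvOverloaded a)) (b1, b2)
      = (b1 || xs.any pvWasOoo, b2 || xs.any pvOverloaded) := by
  induction xs generalizing b1 b2 with
  | nil => simp
  | cons a rest ih => simp [ih, Bool.or_assoc]

-- ===== VERDICT (by name: the statement is the Claim_ definition above) =====
theorem determine_breach_cause_py_spec : Claim_equal_determine_breach_cause_py := by
  intro record _
  unfold Spec_determine_breach_cause_py determine_breach_cause_py determine_breach_cause_py_alt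
  simp only [pvLoopOoo_eq_any, pvLoopOver_eq_any, pvFold_eq_any, Bool.false_or]
  set xs := ((PySem.Dict.mk record).get? "approvers").getD []
  by_cases h1 : xs.any pvWasOoo <;> by_cases h2 : xs.any pvOverloaded <;> simp [h1, h2]
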